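-- pv_equiv track=rewrite | github.com/Teal-Insights/excel-grapher | excel_grapher/evaluator/export_runtime/cache.py | _parse_sheet_address
-- ===== SOURCE A (Python) =====
-- def _parse_sheet_address(address: str) -> tuple[str, str] | None:
--     if address.startswith("'"):
--         i = 1
--         while i < len(address):
--             if address[i] == "'":
--                 if i + 1 < len(address) and address[i + 1] == "'":
--                     i += 2
--                     continue
--                 break
--             i += 1
--         sheet = address[: i + 1]
--         rest = address[i + 1 :]
--         if rest.startswith("!"):
--             return sheet, rest[1:]
--         return None
--
--     if "!" in address:
--         sheet, cell = address.rsplit("!", 1)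
--         return sheet, cell
--
--     return None
-- ===== SOURCE B (Python) =====
-- def _parse_sheet_address(address: str) -> tuple[str, str] | None:
--     if address.startswith("'"):
--         # Split the text after the opening quote on single quotes and walk the
--         # segments: an escaped '' shows up as an empty segment that is not the
--         # last one; the first segment boundary breaking that pattern is the
--         # closing quote.
--         name: list[str] = []
--         tail = address[1:].split("'")
--         while len(tail) >= 3 and tail[1] == "":
--             name += tail[:2]
--             tail = tail[2:]
--         if len(tail) < 2:
--             return None  # no closing quote
--         rest = "'".join(tail[1:])
--         if rest.startswith("!"):
--             return "'" + "'".join(name + [tail[0]]) + "'", rest[1:]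
--         return None
--     if "!" in address:
--         sheet, cell = address.rsplit("!", 1)
--         return sheet, cell
--     return None
-- ===== Notes on version B (the rewrite author's own statement) =====
-- stated objective: alternative
-- what changed: Instead of scanning the quoted name character by character with an index, B splits the text after the opening quote on single quotes once, walks the resulting segment list in pairs (an escaped '' is an empty inner segment that is not the last), and reconstructs sheet and rest with join.
import Mathlib
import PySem

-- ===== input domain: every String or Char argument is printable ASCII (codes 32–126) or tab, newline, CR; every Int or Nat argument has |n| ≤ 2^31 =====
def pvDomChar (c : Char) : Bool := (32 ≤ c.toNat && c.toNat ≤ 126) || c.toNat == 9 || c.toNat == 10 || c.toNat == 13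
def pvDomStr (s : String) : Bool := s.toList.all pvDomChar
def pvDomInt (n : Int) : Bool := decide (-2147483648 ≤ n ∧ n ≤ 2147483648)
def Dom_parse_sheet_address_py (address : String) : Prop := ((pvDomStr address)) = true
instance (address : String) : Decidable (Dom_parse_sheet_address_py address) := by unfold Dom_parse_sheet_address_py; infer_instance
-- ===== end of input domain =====

-- B parses a quoted sheet name by splitting the text after the opening quote on single
-- quotes once and walking the segment list in pairs (an escaped '' is an empty inner
-- segment), reconstructing sheet and rest with join — no character indexing (alternative
-- decomposition; return value proved equal, no speed claim).

-- ===== PORT A =====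
-- the while-loop of A: i advances by 1 over ordinary chars, by 2 over an escaped pair '',
-- and stops (break / loop exit) at a closing quote or at the end of the string.
-- fuel is only a totality guard: each step raises i by ≥ 1, so s.length + 1 never runs out
def pvScanA (s : List Char) : Nat → Nat → Nat
  | 0, i => i
  | fuel+1, i =>
    if h : i < s.length then
      if s[i] = '\'' then
        if h2 : i + 1 < s.length then
          if s[i+1] = '\'' then pvScanA s fuel (i+2) else i
        else i
      else pvScanA s fuel (i+1)
    else i

def parse_sheet_address_py (address : String) : Option (String × String) :=
  let s := address.toList
  if PySem.Chars.startswith s ['\''] then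
    let i := pvScanA s (s.length + 1) 1
    let sheet := PySem.Chars.slice s none (some ((i : Int) + 1))
    let rest := PySem.Chars.slice s (some ((i : Int) + 1)) none
    if PySem.Chars.startswith rest ['!'] then
      some (String.ofList sheet, String.ofList (PySem.Chars.slice rest (some 1) none))
    else none
  else if PySem.Chars.isIn ['!'] s then
    -- address.rsplit("!", 1) with '!' known present: hand port (exact here) —
    -- the pieces before and after the LAST '!'
    let j := (PySem.Chars.rfind s ['!']).toNat
    some (String.ofList (s.take j), String.ofList (s.drop (j+1)))
  else
    none

-- ===== PORT B =====
-- the code after B's while-loop: "if len(tail) < 2: return None" and the closing-quote return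
def pvCloseB (name tail : List (List Char)) : Option (String × String) :=
  if tail.length < 2 then none
  else
    let rest := PySem.Chars.join ['\''] (tail.drop 1)
    if PySem.Chars.startswith rest ['!'] then
      some (String.ofList ('\'' :: (PySem.Chars.join ['\''] (name ++ [tail.headD []]) ++ ['\''])),
            String.ofList (PySem.Chars.slice rest (some 1) none))
    else none

-- B's while-loop "while len(tail) >= 3 and tail[1] == '': name += tail[:2]; tail = tail[2:]"
def pvWalkB (name tail : List (List Char)) : Option (String × String) :=
  match tail with
  | a :: b :: r :: rs =>
    if b = ([] : List Char) then pvWalkB (name ++ [a, b]) (r :: rs)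
    else pvCloseB name (a :: b :: r :: rs)
  | _ => pvCloseB name tail

def parse_sheet_address_py_alt (address : String) : Option (String × String) :=
  let s := address.toList
  if PySem.Chars.startswith s ['\''] then
    pvWalkB [] (PySem.Chars.splitOn (PySem.Chars.slice s (some 1) none) ['\''])
  else if PySem.Chars.isIn ['!'] s then
    -- address.rsplit("!", 1) with '!' known present: hand port (exact here) —
    -- the pieces before and after the LAST '!'
    let j := (PySem.Chars.rfind s ['!']).toNat
    some (String.ofList (s.take j), String.ofList (s.drop (j+1)))
  else
    none

-- ===== PRECONDITION & SPEC =====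
def Spec_parse_sheet_address_py (address : String) (out : Option (String × String)) : Prop := out = parse_sheet_address_py_alt address
instance (address : String) (out : Option (String × String)) : Decidable (Spec_parse_sheet_address_py address out) := by unfold Spec_parse_sheet_address_py; infer_instance

-- ===== CLAIM (what is proved, stated in full; the proofs are below) =====
def Claim_equal_parse_sheet_address_py : Prop := ∀ (address : String), Dom_parse_sheet_address_py address → Spec_parse_sheet_address_py address (parse_sheet_address_py address)

-- ===== LEMMAS AND PROOFS =====

-- reference split of a char list at single quotes (Python str.split("'"))
def splitQ : List Char → List (List Char)
  | [] => [[]]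
  | c :: r =>
    if c = '\'' then [] :: splitQ r
    else
      match splitQ r with
      | h :: t => (c :: h) :: t
      | [] => [[c]]

-- number of characters A's while-loop consumes after the opening quote
def scanR : List Char → Nat
  | [] => 0
  | [c] => if c = '\'' then 0 else 1
  | c :: c2 :: r =>
    if c = '\'' then (if c2 = '\'' then 2 + scanR r else 0)
    else 1 + scanR (c2 :: r)

def consHead (p : List Char) : List (List Char) → List (List Char)
  | [] => [p]
  | h :: t => (p ++ h) :: t

-- the quote that separates an accumulated name prefix from what follows
def qsep (name : List (List Char)) : List Char := if name = [] then [] else ['\'']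

theorem pvWalkB_two (name : List (List Char)) (x y : List Char) :
    pvWalkB name [x, y] = pvCloseB name [x, y] := rfl

theorem pvWalkB_one (name : List (List Char)) (x : List Char) :
    pvWalkB name [x] = pvCloseB name [x] := rfl

theorem pvWalkB_cons3 (name : List (List Char)) (a b r : List Char) (rs : List (List Char)) :
    pvWalkB name (a :: b :: r :: rs)
      = if b = ([] : List Char) then pvWalkB (name ++ [a, b]) (r :: rs)
        else pvCloseB name (a :: b :: r :: rs) := rfl

theorem splitQ_ne_nil (u : List Char) : splitQ u ≠ [] := by
  cases u with
  | nil => simp [splitQ]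
  | cons c r =>
    simp only [splitQ]
    split
    · simp
    · split <;> simp

theorem splitQ_cons_exists (u : List Char) : ∃ h t, splitQ u = h :: t := by
  cases hs : splitQ u with
  | nil => exact absurd hs (splitQ_ne_nil u)
  | cons h t => exact ⟨h, t, rfl⟩

theorem scanR_cons_ne (c : Char) (r : List Char) (hc : ¬ c = '\'') :
    scanR (c :: r) = 1 + scanR r := by
  cases r <;> simp [scanR, hc]

theorem scanR_quote_quote (r : List Char) : scanR ('\'' :: '\'' :: r) = 2 + scanR r := by
  simp [scanR]

theorem scanR_quote_stop (c2 : Char) (r : List Char) (hc2 : ¬ c2 = '\'') :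
    scanR ('\'' :: c2 :: r) = 0 := by
  simp [scanR, hc2]

theorem scanR_quote_nil : scanR ['\''] = 0 := by simp [scanR]

theorem go_eq (fuel : Nat) (l cur : List Char) (acc : List (List Char)) (hf : l.length ≤ fuel) :
    PySem.Chars.splitOn.go ['\''] fuel l cur acc = acc.reverse ++ consHead cur.reverse (splitQ l) := by
  induction fuel generalizing l cur acc with
  | zero =>
    have : l = [] := by cases l <;> simp_all
    subst this
    simp [PySem.Chars.splitOn.go, splitQ, consHead]
  | succ f ih =>
    cases l with
    | nil => simp [PySem.Chars.splitOn.go, splitQ, consHead]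
    | cons c rest =>
      rw [PySem.Chars.splitOn.go]
      by_cases hc : c = '\''
      · have hpre : List.isPrefixOf ['\''] (c :: rest) = true := by
          simp [List.isPrefixOf, hc]
        rw [if_pos hpre]
        simp only [List.length_singleton, List.drop_one, List.tail_cons]
        rw [ih rest [] (cur.reverse :: acc) (by simp at hf; omega)]
        obtain ⟨h, t, ht⟩ := splitQ_cons_exists rest
        simp [splitQ, hc, ht, consHead]
      · have hpre : List.isPrefixOf ['\''] (c :: rest) = false := by
          simp [List.isPrefixOf]
          exact fun h => absurd h.symm hc
        rw [if_neg (by simp [hpre])]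
        rw [ih rest (c :: cur) acc (by simp at hf; omega)]
        obtain ⟨h, t, ht⟩ := splitQ_cons_exists rest
        simp [splitQ, hc, ht, consHead]

theorem splitOn_eq_splitQ (l : List Char) : PySem.Chars.splitOn l ['\''] = splitQ l := by
  rw [PySem.Chars.splitOn, go_eq (l.length + 1) l [] [] (by omega)]
  obtain ⟨h, t, ht⟩ := splitQ_cons_exists l
  simp [ht, consHead]

theorem join_splitQ (u : List Char) : PySem.Chars.join ['\''] (splitQ u) = u := by
  induction u with
  | nil => simp [splitQ, PySem.Chars.join_singleton]
  | cons c r ih =>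
    obtain ⟨h, t, ht⟩ := splitQ_cons_exists r
    by_cases hc : c = '\''
    · rw [show splitQ (c :: r) = [] :: splitQ r from by simp [splitQ, hc]]
      rw [ht, PySem.Chars.join_cons_cons, ← ht, ih, hc]
      simp
    · rw [show splitQ (c :: r) = (c :: h) :: t from by simp [splitQ, hc, ht]]
      cases t with
      | nil =>
        rw [PySem.Chars.join_singleton]
        rw [ht, PySem.Chars.join_singleton] at ih
        simp [ih]
      | cons y ys =>
        rw [PySem.Chars.join_cons_cons]
        rw [ht, PySem.Chars.join_cons_cons] at ih
        simp only [List.cons_append, List.append_assoc] at ih ⊢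
        rw [ih]

theorem join_snoc (name : List (List Char)) (x : List Char) :
    PySem.Chars.join ['\''] (name ++ [x]) = PySem.Chars.join ['\''] name ++ qsep name ++ x := by
  induction name with
  | nil => simp [PySem.Chars.join_singleton, PySem.Chars.join_nil, qsep]
  | cons a rest ih =>
    cases rest with
    | nil =>
      simp only [List.singleton_append, PySem.Chars.join_cons_cons,
        PySem.Chars.join_singleton, qsep]
      simp
    | cons b r =>
      have ihx := ih
      simp only [List.cons_append, PySem.Chars.join_cons_cons] at ihx ⊢
      rw [ihx]
      simp [qsep, List.append_assoc]

theorem scanR_stop : ∀ (u : List Char), scanR u < u.length → u[scanR u]? = some '\''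
  | [], h => by simp [scanR] at h
  | [c], h => by
    by_cases hc : c = '\''
    · simp [scanR, hc]
    · simp [scanR, hc] at h
  | c :: c2 :: r, h => by
    by_cases hc : c = '\''
    · subst hc
      by_cases hc2 : c2 = '\''
      · subst hc2
        rw [scanR_quote_quote] at h ⊢
        simp only [List.length_cons] at h
        have ih := scanR_stop r (by omega)
        rw [show 2 + scanR r = (scanR r + 1) + 1 from by omega]
        simpa using ih
      · rw [scanR_quote_stop c2 r hc2]
        simp
    · rw [scanR_cons_ne c _ hc] at h ⊢
      simp only [List.length_cons] at h
      have ih := scanR_stop (c2 :: r) (by simp only [List.length_cons]; omega)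
      rw [show 1 + scanR (c2 :: r) = scanR (c2 :: r) + 1 from by omega]
      simpa using ih

theorem scanR_qf_all (u : List Char) (h : ∀ c ∈ u, ¬ c = '\'') : scanR u = u.length := by
  induction u with
  | nil => rfl
  | cons c r ih =>
    rw [scanR_cons_ne c r (h c (by simp)), ih (fun x hx => h x (by simp [hx]))]
    simp only [List.length_cons]
    omega

theorem splitQ_qf_all (u : List Char) (h : ∀ c ∈ u, ¬ c = '\'') : splitQ u = [u] := by
  induction u with
  | nil => rfl
  | cons c r ih =>
    have hc : ¬ c = '\'' := h c (by simp)
    simp [splitQ, hc, ih (fun x hx => h x (by simp [hx]))]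

theorem scanR_qf (a v : List Char) (ha : ∀ c ∈ a, ¬ c = '\'') :
    scanR (a ++ '\'' :: v) = a.length + scanR ('\'' :: v) := by
  induction a with
  | nil => simp
  | cons c a' ih =>
    rw [List.cons_append, scanR_cons_ne c _ (ha c (by simp)),
      ih (fun x hx => ha x (by simp [hx]))]
    simp only [List.length_cons]
    omega

theorem splitQ_qf (a v : List Char) (ha : ∀ c ∈ a, ¬ c = '\'') :
    splitQ (a ++ '\'' :: v) = a :: splitQ v := by
  induction a with
  | nil => simp [splitQ]
  | cons c a' ih =>
    have hc : ¬ c = '\'' := ha c (by simp)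
    simp [splitQ, hc, ih (fun x hx => ha x (by simp [hx]))]

theorem take_pre {α : Type} (p u : List α) (m : Nat) :
    (p ++ u).take (p.length + m) = p ++ u.take m := by
  rw [List.take_append, List.take_of_length_le (by omega)]
  simp

theorem drop_pre {α : Type} (p u : List α) (m : Nat) :
    (p ++ u).drop (p.length + m) = u.drop m := by
  rw [List.drop_append, List.drop_eq_nil_of_le (by omega)]
  simp

-- the value B's walk computes, as a function of A's stop offset scanR u
def specW (name : List (List Char)) (u : List Char) : Option (String × String) :=
  if PySem.Chars.startswith (u.drop (scanR u + 1)) ['!'] then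
    some (String.ofList ('\'' :: (PySem.Chars.join ['\''] name ++ qsep name ++ u.take (scanR u) ++ ['\''])),
          String.ofList (u.drop (scanR u + 2)))
  else none

theorem walkB_eq (n : Nat) (u : List Char) (name : List (List Char)) (hn : u.length ≤ n) :
    pvWalkB name (splitQ u) = specW name u := by
  induction n generalizing u name with
  | zero =>
    have : u = [] := by cases u <;> simp_all
    subst this
    simp [splitQ, pvWalkB, pvCloseB, specW, scanR, PySem.Chars.startswith]
  | succ n ih =>
    by_cases hv : u.dropWhile (fun c => !(c = '\'')) = []
    · -- no quote in u at all: splitQ u = [u], the walk falls through, scanR runs off the end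
      have hqf : ∀ c ∈ u, ¬ c = '\'' := by
        intro c hc
        have : c ∈ u.takeWhile (fun c => !(c = '\'')) := by
          rw [← List.takeWhile_append_dropWhile (p := fun c => !(c = '\'')) (l := u)] at hc
          simpa [hv] using hc
        simpa using List.mem_takeWhile_imp this
      rw [splitQ_qf_all u hqf]
      rw [pvWalkB_one]
      simp only [specW, scanR_qf_all u hqf]
      rw [List.drop_eq_nil_of_le (by omega)]
      simp [pvCloseB, show PySem.Chars.startswith [] ['!'] = false from by decide]
    · -- u = a ++ '\'' :: v' with a quote-free
      set a := u.takeWhile (fun c => !(c = '\'')) with hadef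
      have hu0 : a ++ u.dropWhile (fun c => !(c = '\'')) = u := List.takeWhile_append_dropWhile
      have hqa : ∀ c ∈ a, ¬ c = '\'' := fun c hc => by simpa using List.mem_takeWhile_imp hc
      obtain ⟨d, v', hdv⟩ : ∃ d v', u.dropWhile (fun c => !(c = '\'')) = d :: v' := by
        cases h : u.dropWhile (fun c => !(c = '\'')) with
        | nil => exact absurd h hv
        | cons d v' => exact ⟨d, v', rfl⟩
      have hd : d = '\'' := by
        have := List.head_dropWhile_not (fun c => !(c = '\'')) (l := u) (by rw [hdv]; simp)
        simpa [hdv] using this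
      subst hd
      have hu : u = a ++ '\'' :: v' := by rw [← hu0, hdv]
      cases v' with
      | nil =>
        -- u = a ++ ['\'']: lone quote at the very end, rest is empty, both sides none
        rw [hu, splitQ_qf a [] hqa]
        rw [show splitQ [] = [[]] from rfl]
        rw [pvWalkB_two]
        have hscan : scanR (a ++ ['\'']) = a.length := by
          rw [scanR_qf a [] hqa, scanR_quote_nil]
          omega
        simp only [specW, hscan]
        rw [List.drop_eq_nil_of_le (by simp)]
        simp [pvCloseB, PySem.Chars.join_singleton,
          show PySem.Chars.startswith [] ['!'] = false from by decide]
      | cons c2 w =>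
        by_cases hc2 : c2 = '\''
        · -- escaped pair '': B's loop takes a step, A's scan skips both quotes
          subst hc2
          rw [hu, splitQ_qf a _ hqa]
          rw [show splitQ ('\'' :: w) = [] :: splitQ w from by simp [splitQ]]
          obtain ⟨h, t, ht⟩ := splitQ_cons_exists w
          rw [ht]
          rw [pvWalkB_cons3, if_pos rfl]
          rw [← ht]
          have hwlen : w.length ≤ n := by
            rw [hu] at hn; simp at hn; omega
          rw [ih w (name ++ [a, []]) hwlen]
          have hscan : scanR (a ++ '\'' :: '\'' :: w) = a.length + 2 + scanR w := by
            rw [scanR_qf a _ hqa, scanR_quote_quote]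
            omega
          have hsplit : a ++ '\'' :: '\'' :: w = (a ++ ['\'', '\'']) ++ w := by simp
          have hplen : (a ++ ['\'', '\'']).length = a.length + 2 := by simp
          have e1 : (a ++ '\'' :: '\'' :: w).drop (a.length + 2 + scanR w + 1)
              = w.drop (scanR w + 1) := by
            rw [hsplit, show a.length + 2 + scanR w + 1 = (a ++ ['\'', '\'']).length + (scanR w + 1)
              from by rw [hplen]; omega, drop_pre]
          have e2 : (a ++ '\'' :: '\'' :: w).drop (a.length + 2 + scanR w + 2)
              = w.drop (scanR w + 2) := by
            rw [hsplit, show a.length + 2 + scanR w + 2 = (a ++ ['\'', '\'']).length + (scanR w + 2)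
              from by rw [hplen]; omega, drop_pre]
          have e3 : (a ++ '\'' :: '\'' :: w).take (a.length + 2 + scanR w)
              = a ++ '\'' :: '\'' :: w.take (scanR w) := by
            rw [hsplit, show a.length + 2 + scanR w = (a ++ ['\'', '\'']).length + scanR w
              from by rw [hplen], take_pre]
            simp
          have hjs : PySem.Chars.join ['\''] (name ++ [a, []])
              = PySem.Chars.join ['\''] name ++ qsep name ++ a ++ ['\''] := by
            rw [show name ++ [a, []] = (name ++ [a]) ++ [[]] from by simp, join_snoc, join_snoc]
            simp [qsep]
          simp only [specW, hscan, e1, e2, e3, hjs]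
          by_cases hcond : PySem.Chars.startswith (w.drop (scanR w + 1)) ['!'] = true
          · rw [if_pos hcond, if_pos hcond]
            simp [qsep, List.append_assoc]
          · rw [if_neg hcond, if_neg hcond]
        · -- ordinary char (or '!') after the quote: the quote closes the name
          rw [hu, splitQ_qf a _ hqa]
          obtain ⟨h, t, ht⟩ := splitQ_cons_exists w
          rw [show splitQ (c2 :: w) = (c2 :: h) :: t from by simp [splitQ, hc2, ht]]
          have hclose : pvWalkB name (a :: (c2 :: h) :: t) = pvCloseB name (a :: (c2 :: h) :: t) := by
            cases t with
            | nil => exact pvWalkB_two name a (c2 :: h)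
            | cons y ys => rw [pvWalkB_cons3, if_neg (by simp)]
          rw [hclose]
          have hjoin : PySem.Chars.join ['\''] ((c2 :: h) :: t) = c2 :: w := by
            have := join_splitQ (c2 :: w)
            rwa [show splitQ (c2 :: w) = (c2 :: h) :: t from by simp [splitQ, hc2, ht]] at this
          have hscan : scanR (a ++ '\'' :: c2 :: w) = a.length := by
            rw [scanR_qf a _ hqa, scanR_quote_stop c2 w hc2]
            omega
          simp only [pvCloseB, specW, hscan]
          rw [if_neg (by simp)]
          simp only [List.drop_one, List.tail_cons, List.headD_cons, hjoin]
          have hdrop1 : (a ++ '\'' :: c2 :: w).drop (a.length + 1) = c2 :: w := by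
            rw [show a ++ '\'' :: c2 :: w = (a ++ ['\'']) ++ c2 :: w from by simp,
              show a.length + 1 = (a ++ ['\'']).length + 0 from by simp, drop_pre]
            simp
          have hdrop2 : (a ++ '\'' :: c2 :: w).drop (a.length + 2) = w := by
            rw [show a ++ '\'' :: c2 :: w = (a ++ ['\'', c2]) ++ w from by simp,
              show a.length + 2 = (a ++ ['\'', c2]).length + 0 from by simp, drop_pre]
            simp
          have htake : (a ++ '\'' :: c2 :: w).take a.length = a := by
            rw [show a.length = a.length + 0 from rfl, take_pre]
            simp
          rw [hdrop1, hdrop2, htake, join_snoc]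
          by_cases hb : PySem.Chars.startswith (c2 :: w) ['!'] = true
          · rw [if_pos hb, if_pos hb]
            rw [PySem.Chars.slice_eq_listSlice, PySem.List.slice_from_one]
            simp
          · rw [if_neg hb, if_neg hb]

-- A's index scan equals 'start + relative consumption'
theorem scanA_eq (s : List Char) (f i : Nat) (hf : s.length ≤ i + f) :
    pvScanA s f i = i + scanR (s.drop i) := by
  induction f generalizing i with
  | zero =>
    have h : s.drop i = [] := List.drop_eq_nil_of_le (by omega)
    simp [pvScanA, h, scanR]
  | succ f ih =>
    by_cases hi : i < s.length
    · rw [show s.drop i = s[i] :: s.drop (i+1) from List.drop_eq_getElem_cons hi]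
      by_cases hq : s[i] = '\''
      · by_cases h2 : i + 1 < s.length
        · rw [show s.drop (i+1) = s[i+1] :: s.drop (i+2) from List.drop_eq_getElem_cons h2]
          by_cases hq2 : s[i+1] = '\''
          · rw [pvScanA, dif_pos hi, if_pos hq, dif_pos h2, if_pos hq2]
            rw [ih (i+2) (by omega), hq, hq2, scanR_quote_quote]
            omega
          · rw [pvScanA, dif_pos hi, if_pos hq, dif_pos h2, if_neg hq2]
            rw [hq, scanR_quote_stop _ _ hq2]
            omega
        · rw [show s.drop (i+1) = [] from List.drop_eq_nil_of_le (by omega)]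
          rw [pvScanA, dif_pos hi, if_pos hq, dif_neg h2, hq, scanR_quote_nil]
          omega
      · rw [pvScanA, dif_pos hi, if_neg hq]
        rw [ih (i+1) (by omega), scanR_cons_ne _ _ hq]
        omega
    · rw [show s.drop i = [] from List.drop_eq_nil_of_le (by omega)]
      rw [pvScanA, dif_neg hi]
      simp [scanR]

-- ===== VERDICT (by name: the statement is the Claim_ definition above) =====
theorem parse_sheet_address_py_spec : Claim_equal_parse_sheet_address_py := by
  intro address _
  simp only [Spec_parse_sheet_address_py, parse_sheet_address_py, parse_sheet_address_py_alt]
  by_cases hq : PySem.Chars.startswith address.toList ['\''] = true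
  · rw [if_pos hq, if_pos hq]
    obtain ⟨t, ht⟩ : ∃ t, address.toList = '\'' :: t := by
      obtain ⟨r, hr⟩ := (PySem.Chars.startswith_iff _ _).mp hq
      exact ⟨r, by simpa using hr.symm⟩
    rw [ht]
    set k := scanR t with hk
    have hscan : pvScanA ('\'' :: t) (('\'' :: t).length + 1) 1 = 1 + k := by
      rw [scanA_eq ('\'' :: t) _ 1 (by simp only [List.length_cons]; omega)]
      rfl
    rw [hscan]
    rw [show ((1 + k : Nat) : Int) + 1 = ((k + 2 : Nat) : Int) from by push_cast; ring]
    simp only [PySem.Chars.slice_eq_listSlice]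
    rw [PySem.List.slice_to_natCast, PySem.List.slice_from_natCast,
      PySem.List.slice_from_one, PySem.List.slice_from_one]
    rw [show List.tail ('\'' :: t) = t from rfl]
    rw [splitOn_eq_splitQ, walkB_eq t.length t [] le_rfl]
    simp only [specW, PySem.Chars.join_nil, qsep, List.nil_append, ← hk]
    rw [show ('\'' :: t).take (k + 2) = '\'' :: t.take (k + 1) from List.take_succ_cons,
      show ('\'' :: t).drop (k + 2) = t.drop (k + 1) from List.drop_succ_cons]
    by_cases hc : PySem.Chars.startswith (t.drop (k + 1)) ['!'] = true
    · rw [if_pos hc, if_pos hc]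
      have hne : t.drop (k + 1) ≠ [] := by
        intro h0
        rw [h0] at hc
        exact absurd hc (by decide)
      have hklt : k < t.length := by
        by_contra hcon
        exact hne (List.drop_eq_nil_of_le (by omega))
      have hgk : t[k]? = some '\'' := scanR_stop t hklt
      rw [show t.take (k + 1) = t.take k ++ t[k]?.toList from List.take_add_one, hgk]
      rw [show (t.drop (k + 1)).tail = t.drop (k + 2) from List.tail_drop]
      simp
    · rw [if_neg hc, if_neg hc]
  · rw [if_neg hq, if_neg hq]
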